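-- pv_equiv track=rewrite | github.com/taras-svystun/Contest3 | Python_code/C.py | max_prefix_function
-- ===== SOURCE A (Python) =====
-- def max_prefix_function(string: str) -> list:
--     maximal = 0
--     length = len(string)
--     P = [0 for _ in range(length)]
--     for i in range(1, length):
--         j = P[i - 1]
--         while j > 0 and string[i] != string[j]:
--             j = P[j - 1]
--         if string[i] == string[j]:
--             j += 1
--         P[i] = j
--         if j > maximal:
--             maximal = j
--     return maximal
-- ===== SOURCE B (Python) =====
-- def max_prefix_function(string: str) -> list:
--     n = len(string)
--     best = 0
--     for j in range(1, n):
--         k = 0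
--         while j + k < n and string[k] == string[j + k]:
--             k += 1
--         if k > best:
--             best = k
--     return best
-- ===== Notes on version B (the rewrite author's own statement) =====
-- stated objective: idiomatic
-- what changed: Replaces the KMP prefix-function loop (failure-link while-loop and P table) by a direct scan: the answer equals the maximum over j>=1 of the longest common prefix of the string and its suffix starting at j (the maximum of the Z-function), computed by an index-based character-by-character match.
import Mathlib
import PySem

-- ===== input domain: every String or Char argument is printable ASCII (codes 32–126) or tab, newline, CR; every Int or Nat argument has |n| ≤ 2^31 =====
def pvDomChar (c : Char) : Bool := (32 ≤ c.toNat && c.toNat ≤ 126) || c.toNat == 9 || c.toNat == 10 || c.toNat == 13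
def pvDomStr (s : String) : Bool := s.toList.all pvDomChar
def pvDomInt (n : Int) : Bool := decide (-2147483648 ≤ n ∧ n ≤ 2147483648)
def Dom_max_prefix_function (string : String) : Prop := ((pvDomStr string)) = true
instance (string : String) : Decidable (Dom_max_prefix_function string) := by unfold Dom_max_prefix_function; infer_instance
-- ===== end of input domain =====

-- B replaces A's KMP prefix-function computation by the direct identity
-- "answer = max over j ≥ 1 of the longest common prefix of the string and its suffix at j"
-- (the maximum of the Z-function), computed by plain character comparison; objective: idiomatic.

-- ===== PORT A =====
-- the `while j > 0 and string[i] != string[j]: j = P[j-1]` loop; fuel = len(string) always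
-- suffices because j strictly decreases (proved below), so the port is exact.
def kmpBack (cs : List Char) (P : List Nat) (c : Char) : Nat → Nat → Nat
  | 0, j => j
  | fuel + 1, j =>
    if 0 < j ∧ c ≠ cs.getD j ' ' then kmpBack cs P c fuel (P.getD (j - 1) 0) else j

-- one iteration of `for i in range(1, length)`: state = (P, maximal)
def kmpStep (cs : List Char) (st : List Nat × Nat) (i : Nat) : List Nat × Nat :=
  let c := cs.getD i ' '
  let j1 := kmpBack cs st.1 c cs.length (st.1.getD (i - 1) 0)
  let j2 := if c = cs.getD j1 ' ' then j1 + 1 else j1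
  (st.1.set i j2, max st.2 j2)

def max_prefix_function (string : String) : Int :=
  ((((List.range string.toList.length).drop 1).foldl (kmpStep string.toList)
      (List.replicate string.toList.length 0, 0)).2 : Nat)

-- ===== PORT B =====
-- the `while j + k < n and string[k] == string[j + k]: k += 1` loop; fuel = len(string)
-- always suffices because j + k < n keeps k below n, so the port is exact.
def zcount (cs : List Char) (j : Nat) : Nat → Nat → Nat
  | 0, k => k
  | fuel + 1, k =>
    if j + k < cs.length ∧ cs.getD k ' ' = cs.getD (j + k) ' ' then zcount cs j fuel (k + 1)
    else k

def max_prefix_function_alt (string : String) : Int :=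
  ((((List.range string.toList.length).drop 1).foldl
      (fun best j => max best (zcount string.toList j string.toList.length 0)) 0 : Nat))

-- ===== PRECONDITION & SPEC =====
def Spec_max_prefix_function (string : String) (out : Int) : Prop := out = max_prefix_function_alt string
instance (string : String) (out : Int) : Decidable (Spec_max_prefix_function string out) := by unfold Spec_max_prefix_function; infer_instance

-- ===== CLAIM (what is proved, stated in full; the proofs are below) =====
def Claim_equal_max_prefix_function : Prop := ∀ (string : String), Dom_max_prefix_function string → Spec_max_prefix_function string (max_prefix_function string)

-- ===== LEMMAS AND PROOFS =====

-- pfun cs m = length of the longest proper border of the prefix of length m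
def pfun (cs : List Char) (m : Nat) : Nat :=
  Nat.findGreatest (fun k => cs.take k <:+ cs.take m) (m - 1)

theorem pfun_brd (cs : List Char) (m : Nat) : cs.take (pfun cs m) <:+ cs.take m := by
  have h0 : (fun k => cs.take k <:+ cs.take m) 0 := by simp
  simpa [pfun] using
    Nat.findGreatest_spec (P := fun k => cs.take k <:+ cs.take m) (Nat.zero_le (m - 1)) h0

theorem pfun_le (cs : List Char) (m : Nat) : pfun cs m ≤ m - 1 :=
  Nat.findGreatest_le _

theorem le_pfun (cs : List Char) (m k : Nat) (hk : k ≤ m - 1)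
    (hb : cs.take k <:+ cs.take m) : k ≤ pfun cs m := by
  unfold pfun
  exact Nat.le_findGreatest hk hb

theorem suffix_eq_drop {α : Type} {u w : List α} (h : u <:+ w) :
    u = w.drop (w.length - u.length) := by
  obtain ⟨t, rfl⟩ := h
  simp

theorem concat_suffix_concat {α : Type} (u v : List α) (a b : α) :
    (u ++ [a]) <:+ (v ++ [b]) ↔ a = b ∧ u <:+ v := by
  rw [← List.reverse_prefix]
  simp only [List.reverse_append, List.reverse_cons, List.reverse_nil, List.nil_append,
    List.cons_append, List.cons_prefix_cons, List.reverse_prefix]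

theorem border_ext (cs : List Char) (m k : Nat) (hm : m < cs.length) (hk : k < cs.length) :
    cs.take (k + 1) <:+ cs.take (m + 1) ↔
      (cs.take k <:+ cs.take m ∧ cs.getD k ' ' = cs.getD m ' ') := by
  have e1 : cs.take (k + 1) = cs.take k ++ [cs[k]] := by
    rw [List.take_add_one, List.getElem?_eq_getElem hk]; rfl
  have e2 : cs.take (m + 1) = cs.take m ++ [cs[m]] := by
    rw [List.take_add_one, List.getElem?_eq_getElem hm]; rfl
  rw [e1, e2, concat_suffix_concat, List.getD_eq_getElem cs ' ' hk,
    List.getD_eq_getElem cs ' ' hm]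
  tauto

-- lcp a b = length of the longest common prefix of a and b
def lcp : List Char → List Char → Nat
  | a :: as, b :: bs => if a = b then lcp as bs + 1 else 0
  | _, _ => 0

theorem lcp_nil_right (a : List Char) : lcp a [] = 0 := by
  cases a <;> rfl

-- the inner while loop of B counts the common prefix of cs.drop k and cs.drop (j + k)
theorem zcount_eq (cs : List Char) (j : Nat) :
    ∀ fuel k, cs.length - (j + k) ≤ fuel →
      zcount cs j fuel k = k + lcp (cs.drop k) (cs.drop (j + k)) := by
  intro fuel
  induction fuel with
  | zero =>
    intro k hf
    have h : cs.length ≤ j + k := by omega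
    rw [List.drop_eq_nil_of_le h, lcp_nil_right]
    simp [zcount]
  | succ fuel ih =>
    intro k hf
    by_cases hc : j + k < cs.length ∧ cs.getD k ' ' = cs.getD (j + k) ' '
    · have hk : k < cs.length := by omega
      have e1 : cs.drop k = cs[k] :: cs.drop (k + 1) := List.drop_eq_getElem_cons hk
      have e2 : cs.drop (j + k) = cs[j + k] :: cs.drop (j + k + 1) :=
        List.drop_eq_getElem_cons hc.1
      have hch : cs[k] = cs[j + k] := by
        have h := hc.2
        rwa [List.getD_eq_getElem cs ' ' hk, List.getD_eq_getElem cs ' ' hc.1] at h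
      simp only [zcount, if_pos hc]
      rw [ih (k + 1) (by omega), e1, e2]
      simp only [lcp, hch, if_true]
      have e3 : j + (k + 1) = j + k + 1 := by omega
      rw [e3]
      omega
    · simp only [zcount, if_neg hc]
      rcases Nat.lt_or_ge (j + k) cs.length with hlt | hge
      · have hk : k < cs.length := by omega
        have e1 : cs.drop k = cs[k] :: cs.drop (k + 1) := List.drop_eq_getElem_cons hk
        have e2 : cs.drop (j + k) = cs[j + k] :: cs.drop (j + k + 1) :=
          List.drop_eq_getElem_cons hlt
        have hne : cs[k] ≠ cs[j + k] := by
          intro h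
          exact hc ⟨hlt, by rw [List.getD_eq_getElem cs ' ' hk,
            List.getD_eq_getElem cs ' ' hlt, h]⟩
        rw [e1, e2]
        simp [lcp, hne]
      · rw [List.drop_eq_nil_of_le hge, lcp_nil_right]
        omega

theorem zcount_lcp (cs : List Char) (j : Nat) :
    zcount cs j cs.length 0 = lcp cs (cs.drop j) := by
  have h := zcount_eq cs j cs.length 0 (by omega)
  simpa using h

-- lcp facts
theorem lcp_le_right (a b : List Char) : lcp a b ≤ b.length := by
  induction a generalizing b with
  | nil => simp [lcp]
  | cons x xs ih =>
    cases b with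
    | nil => simp [lcp]
    | cons y ys =>
      by_cases h : x = y <;> simp [lcp, h]
      exact ih ys

theorem take_lcp_eq (a b : List Char) : a.take (lcp a b) = b.take (lcp a b) := by
  induction a generalizing b with
  | nil => simp [lcp]
  | cons x xs ih =>
    cases b with
    | nil => simp [lcp]
    | cons y ys =>
      by_cases h : x = y <;> simp [lcp, h]
      exact ih ys

theorem le_lcp (a b : List Char) (k : Nat) (hk : k ≤ a.length)
    (h : a.take k = b.take k) : k ≤ lcp a b := by
  induction a generalizing b k with
  | nil =>
    simp only [List.length_nil, Nat.le_zero] at hk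
    simp [lcp, hk]
  | cons x xs ih =>
    cases k with
    | zero => exact Nat.zero_le _
    | succ k' =>
      cases b with
      | nil => simp at h
      | cons y ys =>
        simp only [List.take_succ_cons, List.cons.injEq] at h
        simp only [lcp, h.1]
        exact Nat.succ_le_succ (ih ys k' (by simpa using hk) h.2)

-- fold-max facts
theorem foldl_max_le_iff (l : List Nat) (a X : Nat) :
    l.foldl max a ≤ X ↔ a ≤ X ∧ ∀ x ∈ l, x ≤ X := by
  induction l generalizing a with
  | nil => simp
  | cons y ys ih =>
    simp only [List.foldl_cons, ih, List.mem_cons]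
    constructor
    · rintro ⟨h1, h2⟩
      exact ⟨le_trans (le_max_left _ _) h1,
        fun x hx => hx.elim (fun e => e ▸ le_trans (le_max_right _ _) h1) (h2 x)⟩
    · rintro ⟨h1, h2⟩
      exact ⟨max_le h1 (h2 y (Or.inl rfl)), fun x hx => h2 x (Or.inr hx)⟩

theorem le_foldl_max (l : List Nat) (a x : Nat) (hx : x ∈ l) : x ≤ l.foldl max a :=
  ((foldl_max_le_iff l a _).mp le_rfl).2 x hx

theorem range_drop_one (n : Nat) : (List.range n).drop 1 = List.range' 1 (n - 1) := by
  cases n with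
  | zero => simp
  | succ m => simp [List.range_eq_range', List.range'_succ]

-- the while loop returns the largest k that is a border of the prefix of length i
-- and matches cs[i] (or 0 if none matches)
theorem kmpBack_spec (cs : List Char) (P : List Nat) (i : Nat) (hi : i < cs.length)
    (hP : ∀ k, k < i → P.getD k 0 = pfun cs (k + 1)) :
    ∀ fuel j, j ≤ fuel → j < i → cs.take j <:+ cs.take i →
      (∀ k, k < i → cs.take k <:+ cs.take i → cs.getD k ' ' = cs.getD i ' ' → k ≤ j) →
      (kmpBack cs P (cs.getD i ' ') fuel j) < i ∧
      cs.take (kmpBack cs P (cs.getD i ' ') fuel j) <:+ cs.take i ∧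
      (kmpBack cs P (cs.getD i ' ') fuel j = 0 ∨
        cs.getD (kmpBack cs P (cs.getD i ' ') fuel j) ' ' = cs.getD i ' ') ∧
      (∀ k, k < i → cs.take k <:+ cs.take i → cs.getD k ' ' = cs.getD i ' ' →
        k ≤ kmpBack cs P (cs.getD i ' ') fuel j) := by
  intro fuel
  induction fuel with
  | zero =>
    intro j hjf hji hb hmax
    have hj0 : j = 0 := Nat.le_zero.mp hjf
    simp only [kmpBack]
    exact ⟨hji, hb, Or.inl hj0, hmax⟩
  | succ fuel ih =>
    intro j hjf hji hb hmax
    by_cases hc : 0 < j ∧ cs.getD i ' ' ≠ cs.getD j ' '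
    · simp only [kmpBack, if_pos hc]
      have hj1 : 1 ≤ j := hc.1
      have hjm1 : j - 1 < i := by omega
      have hPj : P.getD (j - 1) 0 = pfun cs j := by
        have h := hP (j - 1) hjm1
        rwa [Nat.sub_add_cancel hj1] at h
      have hj'le : P.getD (j - 1) 0 ≤ j - 1 := by
        rw [hPj]; exact pfun_le cs j
      apply ih (P.getD (j - 1) 0) (by omega) (by omega)
      · rw [hPj]
        exact (pfun_brd cs j).trans hb
      · intro k hk hkb hkm
        have hkj : k ≤ j := hmax k hk hkb hkm
        have hkne : k ≠ j := by
          intro e; subst e; exact hc.2 hkm.symm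
        have hlk : (cs.take k).length = k := by
          rw [List.length_take]; omega
        have hlj : (cs.take j).length = j := by
          rw [List.length_take]; omega
        have hkbj : cs.take k <:+ cs.take j :=
          List.suffix_of_suffix_length_le hkb hb (by rw [hlk, hlj]; omega)
        rw [hPj]
        exact le_pfun cs j k (by omega) hkbj
    · simp only [kmpBack, if_neg hc]
      have hc' : 0 < j → cs.getD i ' ' = cs.getD j ' ' := by
        intro h
        by_contra hne
        exact hc ⟨h, hne⟩
      refine ⟨hji, hb, ?_, hmax⟩
      by_cases h0 : j = 0
      · exact Or.inl h0
      · exact Or.inr ((hc' (Nat.pos_of_ne_zero h0)).symm)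

-- one step of the main loop computes pfun cs (i+1)
theorem kmpStep_val (cs : List Char) (P : List Nat) (i : Nat) (hi1 : 1 ≤ i) (hi : i < cs.length)
    (hP : ∀ k, k < i → P.getD k 0 = pfun cs (k + 1)) :
    (if cs.getD i ' ' = cs.getD (kmpBack cs P (cs.getD i ' ') cs.length (P.getD (i - 1) 0)) ' '
     then kmpBack cs P (cs.getD i ' ') cs.length (P.getD (i - 1) 0) + 1
     else kmpBack cs P (cs.getD i ' ') cs.length (P.getD (i - 1) 0)) = pfun cs (i + 1) := by
  have hpl := pfun_le cs i
  have hj0 : P.getD (i - 1) 0 = pfun cs i := by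
    have h := hP (i - 1) (by omega)
    rwa [Nat.sub_add_cancel hi1] at h
  obtain ⟨hr_lt, hr_brd, hr_match, hr_max⟩ :=
    kmpBack_spec cs P i hi hP cs.length (P.getD (i - 1) 0)
      (by rw [hj0]; omega) (by rw [hj0]; omega)
      (by rw [hj0]; exact pfun_brd cs i)
      (by
        intro k hk hkb _
        rw [hj0]
        exact le_pfun cs i k (by omega) hkb)
  set r := kmpBack cs P (cs.getD i ' ') cs.length (P.getD (i - 1) 0) with hr
  by_cases hm : cs.getD i ' ' = cs.getD r ' '
  · rw [if_pos hm]
    refine Nat.le_antisymm ?_ ?_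
    · apply le_pfun cs (i + 1) (r + 1) (by omega)
      exact (border_ext cs i r hi (by omega)).mpr ⟨hr_brd, hm.symm⟩
    · rcases e : pfun cs (i + 1) with _ | s
      · exact Nat.zero_le _
      · have hg := pfun_brd cs (i + 1)
        have hgle := pfun_le cs (i + 1)
        rw [e] at hg hgle
        have hx := (border_ext cs i s hi (by omega)).mp hg
        have hsr := hr_max s (by omega) hx.1 hx.2
        omega
  · rw [if_neg hm]
    have hr0 : r = 0 := hr_match.resolve_right (fun h => hm h.symm)
    rw [hr0]
    rcases e : pfun cs (i + 1) with _ | s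
    · rfl
    · exfalso
      have hg := pfun_brd cs (i + 1)
      have hgle := pfun_le cs (i + 1)
      rw [e] at hg hgle
      have hx := (border_ext cs i s hi (by omega)).mp hg
      have hsr := hr_max s (by omega) hx.1 hx.2
      rw [hr0] at hsr
      have hs0 : s = 0 := Nat.le_zero.mp hsr
      rw [hs0] at hx
      exact hm (by rw [hr0]; exact hx.2.symm)

theorem getD_set_eq (l : List Nat) (i v : Nat) (h : i < l.length) :
    (l.set i v).getD i 0 = v := by
  simp [List.getD_eq_getElem?_getD, h]

theorem getD_set_ne (l : List Nat) (i k v : Nat) (h : i ≠ k) :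
    (l.set i v).getD k 0 = l.getD k 0 := by
  simp [List.getD_eq_getElem?_getD, h]

theorem getD_replicate (n k : Nat) : (List.replicate n (0 : Nat)).getD k 0 = 0 := by
  rcases Nat.lt_or_ge k n with h | h
  · simp [List.getD_eq_getElem?_getD, h]
  · simp [List.getD_eq_getElem?_getD, Nat.not_lt.mpr h]

theorem pfun_one (cs : List Char) : pfun cs 1 = 0 := by
  simp [pfun]

-- invariant of the fold over range' 1 m
theorem kmpLoop_inv (cs : List Char) (m : Nat) (hm : m ≤ cs.length - 1) :
    ((List.range' 1 m).foldl (kmpStep cs) (List.replicate cs.length 0, 0)).1.length = cs.length ∧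
    (∀ k, k ≤ m →
      ((List.range' 1 m).foldl (kmpStep cs) (List.replicate cs.length 0, 0)).1.getD k 0 =
        pfun cs (k + 1)) ∧
    ((List.range' 1 m).foldl (kmpStep cs) (List.replicate cs.length 0, 0)).2 =
      ((List.range' 1 m).map (fun t => pfun cs (t + 1))).foldl max 0 := by
  induction m with
  | zero =>
    refine ⟨by simp, ?_, by simp⟩
    intro k hk
    have hk0 : k = 0 := Nat.le_zero.mp hk
    subst hk0
    simpa [List.range'_zero, getD_replicate] using (pfun_one cs).symm
  | succ m ih =>
    have hm' : m ≤ cs.length - 1 := by omega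
    obtain ⟨hlen, hPk, hmax⟩ := ih hm'
    have hiL : m + 1 < cs.length := by omega
    have hval := kmpStep_val cs
      ((List.range' 1 m).foldl (kmpStep cs) (List.replicate cs.length 0, 0)).1
      (m + 1) (by omega) hiL (fun k hk => hPk k (by omega))
    rw [List.range'_1_concat, List.foldl_append, List.foldl_cons, List.foldl_nil,
      List.map_append, List.map_cons, List.map_nil, List.foldl_append, List.foldl_cons,
      List.foldl_nil]
    have h1m : 1 + m = m + 1 := Nat.add_comm 1 m
    rw [h1m]
    simp only [kmpStep]
    refine ⟨by simpa using hlen, ?_, ?_⟩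
    · intro k hk
      rcases Nat.lt_or_ge k (m + 1) with hlt | hge
      · rw [getD_set_ne _ _ _ _ (by omega)]
        exact hPk k (by omega)
      · have hk1 : k = m + 1 := by omega
        subst hk1
        rw [getD_set_eq _ _ _ (by rw [hlen]; exact hiL), hval]
    · rw [hmax, hval]

-- closed forms of the two ports
theorem portA_eq (cs : List Char) :
    (((List.range cs.length).drop 1).foldl (kmpStep cs) (List.replicate cs.length 0, 0)).2 =
      ((List.range' 1 (cs.length - 1)).map (fun t => pfun cs (t + 1))).foldl max 0 := by
  rw [range_drop_one]
  exact (kmpLoop_inv cs (cs.length - 1) le_rfl).2.2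

-- closed form of port B
theorem portB_eq (cs : List Char) (l : List Nat) :
    l.foldl (fun best j => max best (zcount cs j cs.length 0)) 0 =
      (l.map (fun j => lcp cs (cs.drop j))).foldl max 0 := by
  rw [List.foldl_map]
  simp only [zcount_lcp]

-- the two maxima agree
theorem max_eq (cs : List Char) :
    ((List.range' 1 (cs.length - 1)).map (fun t => pfun cs (t + 1))).foldl max 0 =
      ((List.range' 1 (cs.length - 1)).map (fun j => lcp cs (cs.drop j))).foldl max 0 := by
  apply Nat.le_antisymm
  · rw [foldl_max_le_iff]
    refine ⟨Nat.zero_le _, ?_⟩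
    intro x hx
    obtain ⟨i, hi, rfl⟩ := List.mem_map.mp hx
    rw [List.mem_range'_1] at hi
    rcases Nat.eq_zero_or_pos (pfun cs (i + 1)) with h0 | hpos
    · rw [h0]; exact Nat.zero_le _
    · have hin : i < cs.length := by omega
      have hki : pfun cs (i + 1) ≤ i := by have := pfun_le cs (i + 1); omega
      have hbrd := pfun_brd cs (i + 1)
      have hlen1 : (cs.take (pfun cs (i + 1))).length = pfun cs (i + 1) := by
        rw [List.length_take]; omega
      have hlen2 : (cs.take (i + 1)).length = i + 1 := by
        rw [List.length_take]; omega
      have h1 := suffix_eq_drop hbrd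
      rw [hlen1, hlen2] at h1
      rw [List.drop_take] at h1
      have e1 : i + 1 - (i + 1 - pfun cs (i + 1)) = pfun cs (i + 1) := by omega
      rw [e1] at h1
      have hk_lcp : pfun cs (i + 1) ≤ lcp cs (cs.drop (i + 1 - pfun cs (i + 1))) :=
        le_lcp _ _ _ (by omega) h1
      refine le_trans hk_lcp (le_foldl_max _ _ _ ?_)
      exact List.mem_map.mpr ⟨i + 1 - pfun cs (i + 1),
        List.mem_range'_1.mpr ⟨by omega, by omega⟩, rfl⟩
  · rw [foldl_max_le_iff]
    refine ⟨Nat.zero_le _, ?_⟩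
    intro x hx
    obtain ⟨j, hj, rfl⟩ := List.mem_map.mp hx
    rw [List.mem_range'_1] at hj
    rcases Nat.eq_zero_or_pos (lcp cs (cs.drop j)) with h0 | hpos
    · rw [h0]; exact Nat.zero_le _
    · have hjn : j < cs.length := by omega
      have hkle : lcp cs (cs.drop j) ≤ cs.length - j := by
        have := lcp_le_right cs (cs.drop j)
        simpa using this
      have heq := take_lcp_eq cs (cs.drop j)
      have hik : j + lcp cs (cs.drop j) - 1 + 1 = j + lcp cs (cs.drop j) := by omega
      have hbrd : cs.take (lcp cs (cs.drop j)) <:+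
          cs.take (j + lcp cs (cs.drop j) - 1 + 1) := by
        rw [hik]
        have h2 : cs.take (lcp cs (cs.drop j)) =
            (cs.take (j + lcp cs (cs.drop j))).drop j := by
          rw [List.drop_take]
          have e2 : j + lcp cs (cs.drop j) - j = lcp cs (cs.drop j) := by omega
          rw [e2]
          exact heq
        rw [h2]
        exact List.drop_suffix _ _
      have hkp : lcp cs (cs.drop j) ≤ pfun cs (j + lcp cs (cs.drop j) - 1 + 1) :=
        le_pfun cs _ _ (by omega) hbrd
      refine le_trans hkp (le_foldl_max _ _ _ ?_)
      exact List.mem_map.mpr ⟨j + lcp cs (cs.drop j) - 1,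
        List.mem_range'_1.mpr ⟨by omega, by omega⟩, rfl⟩

-- ===== VERDICT (by name: the statement is the Claim_ definition above) =====
theorem max_prefix_function_spec : Claim_equal_max_prefix_function := by
  intro s _
  show _ = _
  unfold max_prefix_function max_prefix_function_alt
  rw [portA_eq, portB_eq, max_eq, range_drop_one]
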